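-- pv_equiv track=rewrite | github.com/AaronZLT/RegExCov_re2 | RegexCovAnalysisCode-master/calRex.py | getAveragesCov
-- ===== SOURCE A (Python) =====
-- def getAveragesCov(info,rep=10):
--     t_nodes=set([cov[1] for cov in info])
--     t_edges=set([cov[3] for cov in info])
--     t_epairs=set([cov[5] for cov in info])
--
--     if len(t_nodes)!=1 or len(t_edges)!=1 or len(t_epairs)!=1:
--         raise ValueError('total number of nodes, edges, epairs should be same across the repetitions')
--
--     sum_nodes=sum(cov[0] for cov in info)
--     sum_edges=sum(cov[2] for cov in info)
--     sum_epairs=sum(cov[4] for cov in info)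
--     return [sum_nodes,t_nodes.pop()*rep,sum_edges,t_edges.pop()*rep,sum_epairs,t_epairs.pop()*rep]
-- ===== SOURCE B (Python) =====
-- def getAveragesCov(info, rep=10):
--     it = iter(info)
--     try:
--         first = next(it)
--     except StopIteration:
--         raise ValueError('total number of nodes, edges, epairs should be same across the repetitions')
--     sum_nodes, n0, sum_edges, e0, sum_epairs, p0 = first
--     for cov in it:
--         if cov[1] != n0 or cov[3] != e0 or cov[5] != p0:
--             raise ValueError('total number of nodes, edges, epairs should be same across the repetitions')
--         sum_nodes += cov[0]
--         sum_edges += cov[2]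
--         sum_epairs += cov[4]
--     return [sum_nodes, n0 * rep, sum_edges, e0 * rep, sum_epairs, p0 * rep]
-- ===== Notes on version B (the rewrite author's own statement) =====
-- stated objective: alternative
-- what changed: Single pass over info accumulating the three sums and checking the three totals against the first row, instead of building three sets plus three separate sum passes; trades A's six traversals and three set constructions for one loop (timing not measurable: A raises on random large inputs).
import Mathlib
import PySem

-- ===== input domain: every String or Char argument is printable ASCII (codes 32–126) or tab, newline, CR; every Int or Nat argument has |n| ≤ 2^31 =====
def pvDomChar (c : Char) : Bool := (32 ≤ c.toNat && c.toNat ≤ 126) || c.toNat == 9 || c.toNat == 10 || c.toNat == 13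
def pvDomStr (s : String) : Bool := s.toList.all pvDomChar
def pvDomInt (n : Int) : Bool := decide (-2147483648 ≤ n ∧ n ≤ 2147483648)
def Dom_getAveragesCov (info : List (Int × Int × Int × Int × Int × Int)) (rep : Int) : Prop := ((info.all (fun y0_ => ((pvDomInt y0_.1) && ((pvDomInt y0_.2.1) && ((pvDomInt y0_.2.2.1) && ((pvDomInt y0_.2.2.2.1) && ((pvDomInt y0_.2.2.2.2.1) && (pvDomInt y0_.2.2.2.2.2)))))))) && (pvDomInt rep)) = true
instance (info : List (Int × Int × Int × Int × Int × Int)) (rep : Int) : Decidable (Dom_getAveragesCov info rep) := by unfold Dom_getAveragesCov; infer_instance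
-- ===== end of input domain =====

-- B replaces A's three set constructions and three separate sum passes with a single
-- accumulating loop over info (alternative decomposition: one traversal instead of six).
-- Both raise ValueError on the same inputs; those are outside Pre_.

-- ===== PORT A =====
-- Literal port of A. The 'raise ValueError' branch returns [] (those inputs are outside Pre_).
-- t_*.pop() on a set the precondition makes a singleton is ported as headD 0.
def getAveragesCov (info : List (Int × Int × Int × Int × Int × Int)) (rep : Int) : List Int :=
  let t_nodes : PySem.Set Int := PySem.Set.ofList (info.map (fun cov => cov.2.1))
  let t_edges : PySem.Set Int := PySem.Set.ofList (info.map (fun cov => cov.2.2.2.1))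
  let t_epairs : PySem.Set Int := PySem.Set.ofList (info.map (fun cov => cov.2.2.2.2.2))
  if t_nodes.length ≠ 1 ∨ t_edges.length ≠ 1 ∨ t_epairs.length ≠ 1 then
    []  -- raise ValueError (outside Pre_)
  else
    let sum_nodes := (info.map (fun cov => cov.1)).sum
    let sum_edges := (info.map (fun cov => cov.2.2.1)).sum
    let sum_epairs := (info.map (fun cov => cov.2.2.2.2.1)).sum
    [sum_nodes, t_nodes.headD 0 * rep, sum_edges, t_edges.headD 0 * rep,
     sum_epairs, t_epairs.headD 0 * rep]

-- ===== PORT B =====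
-- B's loop: checks each remaining row against the first row's totals while accumulating sums.
-- none = ValueError (outside Pre_).
def pvAltLoop (n0 e0 p0 : Int) :
    List (Int × Int × Int × Int × Int × Int) → Int × Int × Int → Option (Int × Int × Int)
  | [], acc => some acc
  | cov :: rest, (sn, se, sp) =>
    if cov.2.1 ≠ n0 ∨ cov.2.2.2.1 ≠ e0 ∨ cov.2.2.2.2.2 ≠ p0 then
      none  -- raise ValueError
    else
      pvAltLoop n0 e0 p0 rest (sn + cov.1, se + cov.2.2.1, sp + cov.2.2.2.2.1)

def getAveragesCov_alt (info : List (Int × Int × Int × Int × Int × Int)) (rep : Int) : List Int :=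
  match info with
  | [] => []  -- raise ValueError (outside Pre_)
  | first :: rest =>
    match pvAltLoop first.2.1 first.2.2.2.1 first.2.2.2.2.2 rest
            (first.1, first.2.2.1, first.2.2.2.2.1) with
    | none => []  -- raise ValueError (outside Pre_)
    | some (sn, se, sp) =>
      [sn, first.2.1 * rep, se, first.2.2.2.1 * rep, sp, first.2.2.2.2.2 * rep]

-- ===== PRECONDITION & SPEC =====
-- Pre_ = exactly the inputs on which A returns normally: info is nonempty and every row has the
-- same totals (components 1, 3, 5) as the first row; elsewhere A raises ValueError.
def Pre_getAveragesCov (info : List (Int × Int × Int × Int × Int × Int)) (rep : Int) : Prop :=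
  info ≠ [] ∧ ∀ x ∈ info,
    x.2.1 = (info.headD (0, 0, 0, 0, 0, 0)).2.1 ∧
    x.2.2.2.1 = (info.headD (0, 0, 0, 0, 0, 0)).2.2.2.1 ∧
    x.2.2.2.2.2 = (info.headD (0, 0, 0, 0, 0, 0)).2.2.2.2.2

instance (info : List (Int × Int × Int × Int × Int × Int)) (rep : Int) : Decidable (Pre_getAveragesCov info rep) := by unfold Pre_getAveragesCov; infer_instance

def pvWitness_getAveragesCov : (List (Int × Int × Int × Int × Int × Int)) × Int :=
  ([(1, 5, 2, 7, 3, 9), (4, 5, 6, 7, 8, 9)], 10)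

def Spec_getAveragesCov (info : List (Int × Int × Int × Int × Int × Int)) (rep : Int) (out : List Int) : Prop := out = getAveragesCov_alt info rep
instance (info : List (Int × Int × Int × Int × Int × Int)) (rep : Int) (out : List Int) : Decidable (Spec_getAveragesCov info rep out) := by unfold Spec_getAveragesCov; infer_instance

-- ===== CLAIM (what is proved, stated in full; the proofs are below) =====
def Claim_equal_getAveragesCov : Prop := ∀ (info : List (Int × Int × Int × Int × Int × Int)) (rep : Int), Dom_getAveragesCov info rep → Pre_getAveragesCov info rep → Spec_getAveragesCov info rep (getAveragesCov info rep)

-- ===== LEMMAS AND PROOFS =====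

-- Building a set from a constant list collapses to the singleton.
theorem pv_foldl_add_const {c : Int} (l : List Int) (h : ∀ x ∈ l, x = c) :
    l.foldl PySem.Set.add [c] = [c] := by
  induction l with
  | nil => rfl
  | cons a t ih =>
    have ha : a = c := h a (by simp)
    subst ha
    simp only [List.foldl_cons]
    have : PySem.Set.add [a] a = [a] := by simp [PySem.Set.add, PySem.Set.contains]
    rw [this]
    exact ih (fun x hx => h x (by simp [hx]))

theorem pv_ofList_const {c : Int} (l : List Int) (h : ∀ x ∈ l, x = c) :
    PySem.Set.ofList (c :: l) = [c] := by
  rw [PySem.Set.ofList_eq_foldl]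
  simp only [List.foldl_cons]
  have hc : PySem.Set.add [] c = [c] := rfl
  rw [hc]
  exact pv_foldl_add_const l h

-- B's loop on rows all matching the reference totals adds the three component sums.
theorem pv_altLoop_spec (n0 e0 p0 : Int) (t : List (Int × Int × Int × Int × Int × Int))
    (ht : ∀ x ∈ t, x.2.1 = n0 ∧ x.2.2.2.1 = e0 ∧ x.2.2.2.2.2 = p0)
    (sn se sp : Int) :
    pvAltLoop n0 e0 p0 t (sn, se, sp) =
      some (sn + (t.map (fun cov => cov.1)).sum,
            se + (t.map (fun cov => cov.2.2.1)).sum,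
            sp + (t.map (fun cov => cov.2.2.2.2.1)).sum) := by
  induction t generalizing sn se sp with
  | nil => simp [pvAltLoop]
  | cons a t ih =>
    obtain ⟨h1, h2, h3⟩ := ht a (by simp)
    simp only [pvAltLoop, h1, h2, h3, ne_eq, not_true_eq_false, or_self, if_false]
    rw [ih (fun x hx => ht x (by simp [hx]))]
    simp only [List.map_cons, List.sum_cons]
    ring_nf

-- ===== VERDICT (by name: the statement is the Claim_ definition above) =====
theorem getAveragesCov_spec : Claim_equal_getAveragesCov := by
  intro info rep _ hpre
  unfold Spec_getAveragesCov
  match info with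
  | [] => exact absurd rfl hpre.1
  | h :: t =>
    have ht : ∀ x ∈ t, x.2.1 = h.2.1 ∧ x.2.2.2.1 = h.2.2.2.1 ∧ x.2.2.2.2.2 = h.2.2.2.2.2 := by
      intro x hx
      simpa using hpre.2 x (by simp [hx])
    have hn : PySem.Set.ofList (h.2.1 :: t.map (fun cov => cov.2.1)) = [h.2.1] :=
      pv_ofList_const _ (by intro x hx; obtain ⟨y, hy, rfl⟩ := List.mem_map.mp hx; exact (ht y hy).1)
    have he : PySem.Set.ofList (h.2.2.2.1 :: t.map (fun cov => cov.2.2.2.1)) = [h.2.2.2.1] :=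
      pv_ofList_const _ (by intro x hx; obtain ⟨y, hy, rfl⟩ := List.mem_map.mp hx; exact (ht y hy).2.1)
    have hp : PySem.Set.ofList (h.2.2.2.2.2 :: t.map (fun cov => cov.2.2.2.2.2)) = [h.2.2.2.2.2] :=
      pv_ofList_const _ (by intro x hx; obtain ⟨y, hy, rfl⟩ := List.mem_map.mp hx; exact (ht y hy).2.2)
    simp only [getAveragesCov, getAveragesCov_alt]
    rw [pv_altLoop_spec h.2.1 h.2.2.2.1 h.2.2.2.2.2 t ht]
    simp [hn, he, hp]
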